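-- pv_equiv track=rewrite | github.com/choman-krishna/Blind-Book | bbb.py | map_a_to_j
-- ===== SOURCE A (Python) =====
-- def map_a_to_j(letter, add = []):
--
--     dist = {
--         1 : (0,0),
--         2 : (1,0),
--         3 : (2,0),
--         4 : (0,1),
--         5 : (1,1),
--         6 : (2,1)
--     }
--
--     if 'a' <= letter <= 'j':
--         map_letters = {
--             'a': [1],
--             'b': [1, 2],
--             'c': [1, 4],
--             'd': [1, 4, 5],
--             'e': [1, 5],
--             'f': [1, 2, 4],
--             'g': [1, 2, 4, 5],
--             'h': [1, 2, 5],
--             'i': [2, 4],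
--             'j': [2, 4, 5]
--         }
--         lst = []
--
--         for n in map_letters[letter]:
--             lst.append(dist[n])
--
--         if add:
--             for n in add:
--                 lst.append(dist[n])
--
--         return lst
--     elif 'j' <= letter <= 't':
--         return map_a_to_j(chr(ord(letter) - 10), [3])
--     else:
--         return map_a_to_j(chr(ord(letter) - 20), [3, 6])
-- ===== SOURCE B (Python) =====
-- def map_a_to_j(letter, add = []):
--     # Non-recursive: normalise the letter and the extra dots in one branch,
--     # then build the result with a single comprehension over a flat tuple table.
--     dist = [(0, 0), (1, 0), (2, 0), (0, 1), (1, 1), (2, 1)]  # dot n -> dist[n-1]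
--     dots = {
--         'a': [1], 'b': [1, 2], 'c': [1, 4], 'd': [1, 4, 5], 'e': [1, 5],
--         'f': [1, 2, 4], 'g': [1, 2, 4, 5], 'h': [1, 2, 5], 'i': [2, 4], 'j': [2, 4, 5],
--     }
--     if 'a' <= letter <= 'j':
--         extra = add
--     elif 'j' <= letter <= 't':
--         letter, extra = chr(ord(letter) - 10), [3]
--     else:
--         letter, extra = chr(ord(letter) - 20), [3, 6]
--     return [dist[n - 1] for n in dots[letter] + extra]
-- ===== Notes on version B (the rewrite author's own statement) =====
-- stated objective: simpler
-- what changed: Replaces A's tail recursion (re-calling itself with a shifted letter and a fresh add list) by a single flat branch that normalises the letter and extra dots once, then builds the result with one comprehension over a flat tuple table indexed by n-1 instead of a dict lookup per dot.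
import Mathlib
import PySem

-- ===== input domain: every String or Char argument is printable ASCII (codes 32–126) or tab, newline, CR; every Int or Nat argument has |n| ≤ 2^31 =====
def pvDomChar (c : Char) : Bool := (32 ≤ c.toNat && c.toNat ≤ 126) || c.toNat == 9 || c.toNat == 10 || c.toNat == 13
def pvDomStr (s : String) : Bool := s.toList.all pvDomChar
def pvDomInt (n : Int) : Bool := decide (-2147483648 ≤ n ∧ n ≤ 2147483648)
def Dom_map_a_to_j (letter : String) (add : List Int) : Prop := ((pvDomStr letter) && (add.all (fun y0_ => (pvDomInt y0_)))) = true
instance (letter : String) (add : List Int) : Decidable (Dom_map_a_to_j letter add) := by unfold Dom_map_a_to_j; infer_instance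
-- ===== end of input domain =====

-- B replaces A's tail recursion by a single flat branch that normalises the letter and the
-- extra dots, then builds the result with one list comprehension over a tuple table (objective: simpler).


-- Python 's <= t' on strings (code-point lexicographic; exact per PYSEM.md str COMPARISON)
def pvStrLE (s t : String) : Bool := !decide (t.toList < s.toList)

-- ===== PORT A =====
def pvDistA : PySem.Dict Int (Int × Int) :=
  PySem.Dict.ofList [(1,(0,0)),(2,(1,0)),(3,(2,0)),(4,(0,1)),(5,(1,1)),(6,(2,1))]

def pvMapLettersA : PySem.Dict String (List Int) :=
  PySem.Dict.ofList [("a",[1]),("b",[1,2]),("c",[1,4]),("d",[1,4,5]),("e",[1,5]),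
                     ("f",[1,2,4]),("g",[1,2,4,5]),("h",[1,2,5]),("i",[2,4]),("j",[2,4,5])]

-- chr(ord(letter) - k): exact when letter is one char with code ≥ k; Python raises otherwise (outside Pre_)
def pvChrSubA (letter : String) (k : Nat) : String :=
  match letter.toList with
  | [c] => String.ofList [Char.ofNat (c.toNat - k)]
  | _ => ""

-- fuel bounds the recursion (depth ≤ 1 inside Pre_); on inputs where Python loops/raises, Pre_ excludes them
def mapAtoJFuel : Nat → String → List Int → List (Int × Int)
  | 0, _, _ => []
  | fuel+1, letter, add =>
    if pvStrLE "a" letter && pvStrLE letter "j" then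
      let lst := (pvMapLettersA.getD letter []).foldl
        (fun lst n => lst ++ [pvDistA.getD n (0,0)]) []
      if add ≠ [] then
        add.foldl (fun lst n => lst ++ [pvDistA.getD n (0,0)]) lst
      else lst
    else if pvStrLE "j" letter && pvStrLE letter "t" then
      mapAtoJFuel fuel (pvChrSubA letter 10) [3]
    else
      mapAtoJFuel fuel (pvChrSubA letter 20) [3,6]

def map_a_to_j (letter : String) (add : List Int) : List (Int × Int) :=
  mapAtoJFuel 2 letter add

-- ===== PORT B =====
def pvDistB : List (Int × Int) := [(0,0),(1,0),(2,0),(0,1),(1,1),(2,1)]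

def pvDotsB : PySem.Dict String (List Int) :=
  PySem.Dict.ofList [("a",[1]),("b",[1,2]),("c",[1,4]),("d",[1,4,5]),("e",[1,5]),
                     ("f",[1,2,4]),("g",[1,2,4,5]),("h",[1,2,5]),("i",[2,4]),("j",[2,4,5])]

def pvChrSubB (letter : String) (k : Nat) : String :=
  match letter.toList with
  | [c] => String.ofList [Char.ofNat (c.toNat - k)]
  | _ => ""

def map_a_to_j_alt (letter : String) (add : List Int) : List (Int × Int) :=
  let p : String × List Int :=
    if pvStrLE "a" letter && pvStrLE letter "j" then (letter, add)
    else if pvStrLE "j" letter && pvStrLE letter "t" then (pvChrSubB letter 10, [3])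
    else (pvChrSubB letter 20, [3,6])
  (pvDotsB.getD p.1 [] ++ p.2).map (fun n => PySem.List.pyGetD pvDistB (n-1) (0,0))

-- ===== PRECONDITION & SPEC =====
-- Pre_ is exactly where the Python A returns: a single character 'a'..'~' (letters 'k'..'z' and
-- '{'..'~' reduce into 'a'..'j'; everything else ends in KeyError/TypeError/ValueError), and when
-- the letter is in 'a'..'j' every element of add must be a dot number 1..6 (elsewhere A discards add).
def Pre_map_a_to_j (letter : String) (add : List Int) : Prop :=
  letter ∈ ["a","b","c","d","e","f","g","h","i","j","k","l","m","n","o","p","q","r","s","t",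
            "u","v","w","x","y","z","{","|","}","~"] ∧
  (pvStrLE letter "j" = true → ∀ n ∈ add, 1 ≤ n ∧ n ≤ 6)
instance (letter : String) (add : List Int) : Decidable (Pre_map_a_to_j letter add) := by
  unfold Pre_map_a_to_j; infer_instance

def pvWitness_map_a_to_j : String × List Int := ("c", [3, 6])

def Spec_map_a_to_j (letter : String) (add : List Int) (out : List (Int × Int)) : Prop := out = map_a_to_j_alt letter add
instance (letter : String) (add : List Int) (out : List (Int × Int)) : Decidable (Spec_map_a_to_j letter add out) := by unfold Spec_map_a_to_j; infer_instance

-- ===== CLAIM (what is proved, stated in full; the proofs are below) =====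
def Claim_equal_map_a_to_j : Prop := ∀ (letter : String) (add : List Int), Dom_map_a_to_j letter add → Pre_map_a_to_j letter add → Spec_map_a_to_j letter add (map_a_to_j letter add)

-- ===== LEMMAS AND PROOFS =====

-- A's dict lookup dist[n] agrees with B's table indexing dist[n-1] for dot numbers 1..6
lemma dot_val (n : Int) (h1 : 1 ≤ n) (h2 : n ≤ 6) :
    pvDistA.getD n (0,0) = PySem.List.pyGetD pvDistB (n-1) (0,0) := by
  interval_cases n <;> decide

-- A's append loop over add equals B's mapped tail, for in-range dot numbers
lemma foldl_add_eq (lst : List (Int × Int)) (add : List Int)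
    (h : ∀ n ∈ add, 1 ≤ n ∧ n ≤ 6) :
    add.foldl (fun lst n => lst ++ [pvDistA.getD n (0,0)]) lst
      = lst ++ add.map (fun n => PySem.List.pyGetD pvDistB (n-1) (0,0)) := by
  rw [PySem.List.foldl_append_singleton_eq_map]
  congr 1
  exact List.map_congr_left (fun n hn => dot_val n (h n hn).1 (h n hn).2)

-- the a..j case for one concrete letter
lemma aj_case (letter : String) (add : List Int)
    (hmem : letter ∈ ["a","b","c","d","e","f","g","h","i","j"])
    (h : ∀ n ∈ add, 1 ≤ n ∧ n ≤ 6) :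
    map_a_to_j letter add = map_a_to_j_alt letter add := by
  simp only [List.mem_cons, List.not_mem_nil, or_false] at hmem
  rcases hmem with rfl|rfl|rfl|rfl|rfl|rfl|rfl|rfl|rfl|rfl <;>
  · show (if (_ : List Int) ≠ [] then _ else _) = _
    rcases eq_or_ne add [] with rfl | hne
    · decide
    · rw [if_pos hne, foldl_add_eq _ _ h]
      show _ = List.map _ (_ ++ add)
      rw [List.map_append]
      congr 1

-- ===== VERDICT (by name: the statement is the Claim_ definition above) =====
theorem map_a_to_j_spec : Claim_equal_map_a_to_j := by
  intro letter add _ hpre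
  obtain ⟨hmem, hadd⟩ := hpre
  unfold Spec_map_a_to_j
  simp only [List.mem_cons, List.not_mem_nil, or_false] at hmem
  rcases hmem with rfl|rfl|rfl|rfl|rfl|rfl|rfl|rfl|rfl|rfl|rfl|rfl|rfl|rfl|rfl|rfl|rfl|rfl|rfl|rfl|rfl|rfl|rfl|rfl|rfl|rfl|rfl|rfl|rfl|rfl
  -- 'a'..'j': both sides are the same table walk plus the mapped add tail
  case _ => exact aj_case _ add (by decide) (hadd (by decide))
  case _ => exact aj_case _ add (by decide) (hadd (by decide))
  case _ => exact aj_case _ add (by decide) (hadd (by decide))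
  case _ => exact aj_case _ add (by decide) (hadd (by decide))
  case _ => exact aj_case _ add (by decide) (hadd (by decide))
  case _ => exact aj_case _ add (by decide) (hadd (by decide))
  case _ => exact aj_case _ add (by decide) (hadd (by decide))
  case _ => exact aj_case _ add (by decide) (hadd (by decide))
  case _ => exact aj_case _ add (by decide) (hadd (by decide))
  case _ => exact aj_case _ add (by decide) (hadd (by decide))
  -- 'k'..'~': add is discarded by both sides; the results are closed terms
  all_goals rfl
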